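-- pv_equiv track=rewrite | github.com/RPRicardo/COMP_LB2 | Automatas_v1.py | afd1
-- ===== SOURCE A (Python) =====
-- def afd1(cadena):
--     estado = 'p'
--     for simbolo in cadena:
--         if estado == 'p':
--             estado = 'q' if simbolo == 'a' else 'r'
--         elif estado == 'q':
--             estado = 'q' if simbolo == 'a' else 'r'
--         elif estado == 'r':
--             estado = 'r'
--     return estado == 'q'
-- ===== SOURCE B (Python) =====
-- def afd1(cadena):
--     return bool(cadena) and all(c == 'a' for c in cadena)
-- ===== Notes on version B (the rewrite author's own statement) =====
-- stated objective: idiomatic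
-- what changed: Replaces the explicit DFA state variable and branch table with a direct predicate: nonempty and all characters equal the accepted symbol, via all().
import Mathlib
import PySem

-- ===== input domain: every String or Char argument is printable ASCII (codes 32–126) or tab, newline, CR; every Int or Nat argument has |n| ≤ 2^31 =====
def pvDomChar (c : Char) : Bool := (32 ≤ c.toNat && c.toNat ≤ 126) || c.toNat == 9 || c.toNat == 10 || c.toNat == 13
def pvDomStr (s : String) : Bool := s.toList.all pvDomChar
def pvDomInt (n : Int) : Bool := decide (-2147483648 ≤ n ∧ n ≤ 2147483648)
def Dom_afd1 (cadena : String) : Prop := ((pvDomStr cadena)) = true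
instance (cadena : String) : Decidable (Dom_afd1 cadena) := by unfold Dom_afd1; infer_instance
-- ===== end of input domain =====

-- B replaces A's explicit DFA state machine with the direct predicate "nonempty and all 'a'" (idiomatic).

-- ===== PORT A =====
-- literal port of A: fold the DFA transition over the characters, state is a Char ('p'/'q'/'r')
def afd1_step (estado : Char) (simbolo : Char) : Char :=
  if estado = 'p' then (if simbolo = 'a' then 'q' else 'r')
  else if estado = 'q' then (if simbolo = 'a' then 'q' else 'r')
  else if estado = 'r' then 'r'
  else estado

def afd1 (cadena : String) : Bool :=
  (cadena.toList.foldl afd1_step 'p') = 'q'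

-- ===== PORT B =====
-- port of Source B: bool(cadena) and all(c == 'a' for c in cadena)
def afd1_alt (cadena : String) : Bool :=
  !cadena.toList.isEmpty && cadena.toList.all (fun c => c == 'a')

-- ===== PRECONDITION & SPEC =====
def Spec_afd1 (cadena : String) (out : Bool) : Prop := out = afd1_alt cadena
instance (cadena : String) (out : Bool) : Decidable (Spec_afd1 cadena out) := by unfold Spec_afd1; infer_instance

-- ===== CLAIM (what is proved, stated in full; the proofs are below) =====
def Claim_equal_afd1 : Prop := ∀ (cadena : String), Dom_afd1 cadena → Spec_afd1 cadena (afd1 cadena)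

-- ===== LEMMAS AND PROOFS =====

-- from state 'q': stays in 'q' iff every remaining char is 'a'
theorem afd1_fold_q (l : List Char) :
    ((l.foldl afd1_step 'q') = 'q') = (l.all (fun c => c == 'a')) := by
  induction l with
  | nil => simp
  | cons c t ih =>
    by_cases h : c = 'a'
    · simp [List.foldl, afd1_step, h, ih]
    · have hr : ∀ (m : List Char), m.foldl afd1_step 'r' = 'r' := by
        intro m; induction m with
        | nil => rfl
        | cons d u ihu => simpa [List.foldl, afd1_step] using ihu
      simp [List.foldl, afd1_step, h, hr]

-- ===== VERDICT (by name: the statement is the Claim_ definition above) =====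
theorem afd1_spec : Claim_equal_afd1 := by
  intro cadena _
  unfold Spec_afd1 afd1 afd1_alt
  cases h : cadena.toList with
  | nil => simp [h]
  | cons c t =>
    by_cases hc : c = 'a'
    · simp [List.foldl, afd1_step, hc, afd1_fold_q, List.all_eq]
    · have hr : ∀ (m : List Char), m.foldl afd1_step 'r' = 'r' := by
        intro m; induction m with
        | nil => rfl
        | cons d u ihu => simpa [List.foldl, afd1_step] using ihu
      simp [List.foldl, afd1_step, hc, hr]
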